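-- pv_equiv track=rewrite | github.com/ShiXiangYu1/Data_indicators | data_insight/data_insight/core/action_recommender.py | _assign_priorities
-- ===== SOURCE A (Python) =====
-- from typing import Dict, Any, List, Optional, Tuple
--
-- def _assign_priorities(actions: List[str]) -> List[str]:
--     """
--     为行动建议分配优先级标签
--
--     参数:
--         actions (List[str]): 行动建议列表
--
--     返回:
--         List[str]: 优先级标签列表
--     """
--     # 根据建议数量分配优先级
--     priorities = []
--     for i, _ in enumerate(actions):
--         if i == 0:
--             priorities.append("高")
--         elif i < 2:
--             priorities.append("中高")
--         elif i < 4: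
--             priorities.append("中")
--         else:
--             priorities.append("低")
--
--     return priorities
-- ===== SOURCE B (Python) =====
-- def _assign_priorities(actions):
--     n = len(actions)
--     return ["高", "中高", "中", "中"][:n] + ["低"] * (n - 4)
-- ===== Notes on version B (the rewrite author's own statement) =====
-- stated objective: simpler
-- what changed: Eliminates the per-element enumerate loop with an if/elif cascade entirely: the output is built wholesale as a slice of a fixed 4-label prefix concatenated with a replicated '低' tail.
import Mathlib
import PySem

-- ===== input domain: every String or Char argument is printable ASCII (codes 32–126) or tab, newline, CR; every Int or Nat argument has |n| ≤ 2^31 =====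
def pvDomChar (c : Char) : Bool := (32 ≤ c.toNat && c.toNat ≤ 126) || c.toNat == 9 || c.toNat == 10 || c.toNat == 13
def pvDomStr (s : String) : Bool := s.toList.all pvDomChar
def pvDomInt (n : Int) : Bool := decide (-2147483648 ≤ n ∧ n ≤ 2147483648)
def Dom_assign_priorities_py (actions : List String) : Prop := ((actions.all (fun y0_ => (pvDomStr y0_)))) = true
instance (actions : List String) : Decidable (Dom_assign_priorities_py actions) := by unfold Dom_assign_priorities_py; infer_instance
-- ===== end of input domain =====

-- B drops A's per-element loop with an if/elif cascade and instead builds the whole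
-- output as a slice of a fixed 4-label prefix plus a replicated "低" tail (objective: simpler).

-- ===== PORT A =====
def assign_priorities_py (actions : List String) : List String :=
  (PySem.List.enumerate actions 0).foldl
    (fun priorities p =>
      if p.1 == 0 then priorities ++ ["高"]
      else if p.1 < 2 then priorities ++ ["中高"]
      else if p.1 < 4 then priorities ++ ["中"]
      else priorities ++ ["低"])
    []

-- ===== PORT B =====
-- ["高","中高","中","中"][:n] is List.take n (n = len ≥ 0); ["低"] * (n-4) is
-- List.replicate (n-4) (Python's empty list for n < 4 = Nat truncated subtraction).
def assign_priorities_py_alt (actions : List String) : List String :=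
  let n := actions.length
  List.take n ["高", "中高", "中", "中"] ++ List.replicate (n - 4) "低"

-- ===== PRECONDITION & SPEC =====
def Spec_assign_priorities_py (actions : List String) (out : List String) : Prop := out = assign_priorities_py_alt actions
instance (actions : List String) (out : List String) : Decidable (Spec_assign_priorities_py actions out) := by unfold Spec_assign_priorities_py; infer_instance

-- ===== CLAIM (what is proved, stated in full; the proofs are below) =====
def Claim_equal_assign_priorities_py : Prop := ∀ (actions : List String), Dom_assign_priorities_py actions → Spec_assign_priorities_py actions (assign_priorities_py actions)

-- ===== LEMMAS AND PROOFS =====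

def pvLab (i : Int) : String :=
  if i == 0 then "高" else if i < 2 then "中高" else if i < 4 then "中" else "低"

theorem pvA_foldl (xs : List String) : ∀ (s : Int) (acc : List String),
    (PySem.List.enumerate xs s).foldl
      (fun priorities p =>
        if p.1 == 0 then priorities ++ ["高"]
        else if p.1 < 2 then priorities ++ ["中高"]
        else if p.1 < 4 then priorities ++ ["中"]
        else priorities ++ ["低"])
      acc
    = acc ++ (List.range xs.length).map (fun (j : Nat) => pvLab (s + (j : Int))) := by
  induction xs with
  | nil => intro s acc; simp [PySem.List.enumerate_nil]
  | cons x xs ih =>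
    intro s acc
    rw [PySem.List.enumerate_cons]
    simp only [List.foldl_cons, List.length_cons, List.range_succ_eq_map, List.map_cons,
      List.map_map, ih]
    have h1 : (if (s == 0) = true then acc ++ ["高"]
        else if s < 2 then acc ++ ["中高"] else if s < 4 then acc ++ ["中"]
        else acc ++ ["低"]) = acc ++ [pvLab s] := by
      unfold pvLab; split_ifs <;> rfl
    rw [h1, List.append_assoc, List.singleton_append]
    congr 2
    · simp
    · refine List.map_congr_left (fun j _ => ?_)
      have h : s + 1 + (j : Int) = s + (Nat.succ j : Int) := by push_cast; ring
      simp [Function.comp, h]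

theorem pvMap_eq_take_replicate : ∀ (n : Nat),
    (List.range n).map (fun (j : Nat) => pvLab (j : Int))
      = List.take n ["高", "中高", "中", "中"] ++ List.replicate (n - 4) "低" := by
  have step : ∀ n : Nat, 4 ≤ n →
      (List.range n).map (fun (j : Nat) => pvLab (j : Int))
        = List.take n ["高", "中高", "中", "中"] ++ List.replicate (n - 4) "低" →
      (List.range (n + 1)).map (fun (j : Nat) => pvLab (j : Int))
        = List.take (n + 1) ["高", "中高", "中", "中"] ++ List.replicate (n + 1 - 4) "低" := by
    intro n hn ih
    have hlab : pvLab (n : Int) = "低" := by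
      unfold pvLab
      rw [if_neg (by simp; omega), if_neg (by push_cast; omega), if_neg (by push_cast; omega)]
    have htake : List.take (n + 1) ["高", "中高", "中", "中"] = List.take n ["高", "中高", "中", "中"] := by
      rw [List.take_of_length_le (by simp; omega), List.take_of_length_le (by simp; omega)]
    have hrep : List.replicate (n + 1 - 4) "低" = List.replicate (n - 4) "低" ++ ["低"] := by
      have : n + 1 - 4 = (n - 4) + 1 := by omega
      rw [this, List.replicate_succ' ]
    rw [List.range_succ, List.map_append, ih, htake, hrep, List.map_singleton, hlab,
      List.append_assoc]
  intro n
  by_cases h : n ≤ 4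
  · interval_cases n <;> decide
  · have h4 : 4 ≤ n := by omega
    clear h
    induction n with
    | zero => omega
    | succ m ihm =>
      by_cases hm : 4 ≤ m
      · exact step m hm (ihm hm)
      · have hm4 : ¬ 4 ≤ m := hm
        have : m + 1 = 4 := by omega
        rw [this]; decide

-- ===== VERDICT (by name: the statement is the Claim_ definition above) =====
theorem assign_priorities_py_spec : Claim_equal_assign_priorities_py := by
  intro actions _
  unfold Spec_assign_priorities_py assign_priorities_py assign_priorities_py_alt
  rw [pvA_foldl]
  simp only [List.nil_append, Int.zero_add]
  exact pvMap_eq_take_replicate actions.length
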